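-- pv_equiv track=rewrite | github.com/AdityaVoracpp/Cube-solver | solver.py | remove_fours
-- ===== SOURCE A (Python) =====
-- def remove_fours(arr):
--     flag = False
--     i = 0
--     while i <= len(arr) - 4:
--         count = 1
--         while i + count < len(arr) and arr[i] == arr[i + count]:
--             count += 1
--
--         if count >= 4:
--             flag = True
--             del arr[i:i + 4]
--         else:
--             i += 1
--     if flag:
--         return remove_fours(arr)
--     else:
--         return arr
-- ===== SOURCE B (Python) =====
-- def remove_fours(arr):
--     # Single pass with a run-length stack: push (value,count); a count
--     # reaching 4 pops the run, letting neighbours merge. O(n) instead of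
--     # A's repeated rescans. (Unlike A, does not mutate arr in place.)
--     stack = []
--     for x in arr:
--         if stack and stack[-1][0] == x:
--             c = stack[-1][1] + 1
--             if c == 4:
--                 stack.pop()
--             else:
--                 stack[-1] = (x, c)
--         else:
--             stack.append((x, 1))
--     out = []
--     for v, c in stack:
--         out.extend([v] * c)
--     return out
-- ===== Notes on version B (the rewrite author's own statement) =====
-- stated objective: faster
-- what changed: Replaces A's repeated quadratic rescans (inner run-count scan plus full recursive restarts after each deletion) with a single linear pass over a run-length stack of (value,count) pairs that pops a run when its count reaches 4; B does not mutate arr in place, only the return value is matched.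
import Mathlib
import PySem

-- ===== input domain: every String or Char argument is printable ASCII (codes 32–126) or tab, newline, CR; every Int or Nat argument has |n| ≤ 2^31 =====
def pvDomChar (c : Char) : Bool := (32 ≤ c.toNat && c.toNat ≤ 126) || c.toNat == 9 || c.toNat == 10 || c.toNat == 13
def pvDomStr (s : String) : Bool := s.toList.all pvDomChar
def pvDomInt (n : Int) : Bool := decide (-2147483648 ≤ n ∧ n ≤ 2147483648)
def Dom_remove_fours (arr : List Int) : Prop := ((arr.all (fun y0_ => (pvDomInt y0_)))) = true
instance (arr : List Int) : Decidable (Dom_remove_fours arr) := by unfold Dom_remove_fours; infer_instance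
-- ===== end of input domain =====

-- B replaces A's repeated rescans with one pass over a run-length stack; the
-- equivalence is about the RETURN value only (A mutates arr in place, B does not).

-- ===== PORT A =====
-- A's loops, step for step; each loop carries a fuel bound that is provably never
-- reached (each iteration strictly decreases length - i, resp. the list length),
-- so the 0-fuel branch is dead code on every input.

-- inner while: count = 1; while i + count < len(arr) and arr[i] == arr[i+count]: count += 1
def runcount (fuel : Nat) (a : List Int) (i c : Nat) : Nat :=
  match fuel with
  | 0 => c
  | fuel + 1 =>
    if i + c < a.length ∧ a[i]! = a[i + c]! then runcount fuel a i (c + 1) else c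

-- outer while loop of A: state (arr, i, flag); 'del arr[i:i+4]' = take i ++ drop (i+4)
def passA (fuel : Nat) (arr : List Int) (i : Nat) (flag : Bool) : List Int × Bool :=
  match fuel with
  | 0 => (arr, flag)
  | fuel + 1 =>
    if i + 4 ≤ arr.length then
      if 4 ≤ runcount (arr.length + 1) arr i 1 then
        passA fuel (arr.take i ++ arr.drop (i + 4)) i true
      else
        passA fuel arr (i + 1) flag
    else (arr, flag)

-- 'if flag: return remove_fours(arr)' — at most len/4 + 1 restarts, so len+1 fuel suffices
def removeLoop (fuel : Nat) (arr : List Int) : List Int :=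
  match fuel with
  | 0 => arr
  | fuel + 1 =>
    let p := passA (arr.length + 1) arr 0 false
    if p.2 then removeLoop fuel p.1 else p.1

def remove_fours (arr : List Int) : List Int :=
  removeLoop (arr.length + 1) arr

-- ===== PORT B =====
-- one step of B's loop body; the stack top is the HEAD of the list
def stepB (s : List (Int × Nat)) (x : Int) : List (Int × Nat) :=
  match s with
  | (v, c) :: t =>
      if v = x then (if c + 1 = 4 then t else (v, c + 1) :: t)
      else (x, 1) :: (v, c) :: t
  | [] => [(x, 1)]

-- the final flattening loop: out.extend([v]*c) for each stack entry (bottom first)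
def flatB (s : List (Int × Nat)) : List Int :=
  s.reverse.flatMap (fun p => List.replicate p.2 p.1)

def remove_fours_alt (arr : List Int) : List Int :=
  flatB (arr.foldl stepB [])

-- ===== PRECONDITION & SPEC =====
def Spec_remove_fours (arr : List Int) (out : List Int) : Prop := out = remove_fours_alt arr
instance (arr : List Int) (out : List Int) : Decidable (Spec_remove_fours arr out) := by unfold Spec_remove_fours; infer_instance

-- ===== CLAIM (what is proved, stated in full; the proofs are below) =====
def Claim_equal_remove_fours : Prop := ∀ (arr : List Int), Dom_remove_fours arr → Spec_remove_fours arr (remove_fours arr)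

-- ===== LEMMAS AND PROOFS =====

-- invariant of B's stack: counts in 1..3, adjacent runs carry distinct values
def InvS : List (Int × Nat) → Prop
  | [] => True
  | [(_, c)] => 1 ≤ c ∧ c ≤ 3
  | (v, c) :: (w, d) :: t => 1 ≤ c ∧ c ≤ 3 ∧ v ≠ w ∧ InvS ((w, d) :: t)

theorem invS_head (v : Int) (c : Nat) (t : List (Int × Nat))
    (h : InvS ((v, c) :: t)) : 1 ≤ c ∧ c ≤ 3 := by
  cases t with
  | nil => exact h
  | cons q t' => exact ⟨h.1, h.2.1⟩

theorem invS_tail (p : Int × Nat) (t : List (Int × Nat)) (h : InvS (p :: t)) : InvS t := by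
  obtain ⟨v, c⟩ := p
  cases t with
  | nil => trivial
  | cons q t' => exact h.2.2.2

theorem invS_nehead (v : Int) (c : Nat) (t : List (Int × Nat)) (h : InvS ((v, c) :: t))
    (w : Int) (d : Nat) (t' : List (Int × Nat)) (ht : t = (w, d) :: t') : v ≠ w := by
  subst ht; exact h.2.2.1

theorem stepB_push (t : List (Int × Nat)) (x : Int)
    (h : ∀ (w : Int) (d : Nat) (t' : List (Int × Nat)), t = (w, d) :: t' → w ≠ x) :
    stepB t x = (x, 1) :: t := by
  cases t with
  | nil => rfl
  | cons p t' =>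
    obtain ⟨w, d⟩ := p
    simp [stepB, h w d t' rfl]

theorem invS_step (s : List (Int × Nat)) (x : Int) (h : InvS s) : InvS (stepB s x) := by
  cases s with
  | nil => exact ⟨le_refl 1, by omega⟩
  | cons p t =>
    obtain ⟨v, c⟩ := p
    obtain ⟨hc1, hc3⟩ := invS_head v c t h
    by_cases hv : v = x
    · by_cases h4 : c + 1 = 4
      · simpa [stepB, hv, h4] using invS_tail _ _ h
      · have : stepB ((v, c) :: t) x = (v, c + 1) :: t := by simp [stepB, hv, h4]
        rw [this]
        cases t with
        | nil => exact ⟨by omega, by omega⟩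
        | cons q t' => exact ⟨by omega, by omega, h.2.2.1, h.2.2.2⟩
    · have : stepB ((v, c) :: t) x = (x, 1) :: (v, c) :: t := by simp [stepB, hv]
      rw [this]
      exact ⟨le_refl 1, by omega, fun hxv => hv hxv.symm, h⟩

theorem invS_foldl_gen (l : List Int) (s : List (Int × Nat)) (h : InvS s) :
    InvS (l.foldl stepB s) := by
  induction l generalizing s with
  | nil => exact h
  | cons x l ih => exact ih _ (invS_step s x h)

theorem invS_foldl (l : List Int) : InvS (l.foldl stepB []) :=
  invS_foldl_gen l [] trivial

-- feeding four equal values into an invariant stack is a no-op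
theorem step4 (s : List (Int × Nat)) (a : Int) (h : InvS s) :
    stepB (stepB (stepB (stepB s a) a) a) a = s := by
  cases s with
  | nil => simp [stepB]
  | cons p t =>
    obtain ⟨v, c⟩ := p
    by_cases hv : v = a
    · subst hv
      obtain ⟨hc1, hc3⟩ := invS_head v c t h
      have hpush : stepB t v = (v, 1) :: t :=
        stepB_push t v (fun w d t' ht => (invS_nehead v c t h w d t' ht).symm)
      interval_cases c
      · have e1 : stepB ((v, 1) :: t) v = (v, 2) :: t := by simp [stepB]
        have e2 : stepB ((v, 2) :: t) v = (v, 3) :: t := by simp [stepB]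
        have e3 : stepB ((v, 3) :: t) v = t := by simp [stepB]
        rw [e1, e2, e3, hpush]
      · have e2 : stepB ((v, 2) :: t) v = (v, 3) :: t := by simp [stepB]
        have e3 : stepB ((v, 3) :: t) v = t := by simp [stepB]
        have e1 : stepB ((v, 1) :: t) v = (v, 2) :: t := by simp [stepB]
        rw [e2, e3, hpush, e1]
      · have e3 : stepB ((v, 3) :: t) v = t := by simp [stepB]
        have e1 : stepB ((v, 1) :: t) v = (v, 2) :: t := by simp [stepB]
        have e2 : stepB ((v, 2) :: t) v = (v, 3) :: t := by simp [stepB]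
        rw [e3, hpush, e1, e2]
    · have e0 : stepB ((v, c) :: t) a = (a, 1) :: (v, c) :: t := by simp [stepB, hv]
      have e1 : stepB ((a, 1) :: (v, c) :: t) a = (a, 2) :: (v, c) :: t := by simp [stepB]
      have e2 : stepB ((a, 2) :: (v, c) :: t) a = (a, 3) :: (v, c) :: t := by simp [stepB]
      have e3 : stepB ((a, 3) :: (v, c) :: t) a = (v, c) :: t := by simp [stepB]
      rw [e0, e1, e2, e3]

-- "no four consecutive equal elements"
def No4 (l : List Int) : Prop := ∀ (u : List Int) (a : Int) (v : List Int),
  l ≠ u ++ a :: a :: a :: a :: v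

theorem stack_delete (u : List Int) (a : Int) (v : List Int) :
    (u ++ a :: a :: a :: a :: v).foldl stepB [] = (u ++ v).foldl stepB [] := by
  have h := invS_foldl u
  simp only [List.foldl_append, List.foldl_cons]
  rw [step4 _ a h]

theorem flatB_cons (v : Int) (c : Nat) (t : List (Int × Nat)) :
    flatB ((v, c) :: t) = flatB t ++ List.replicate c v := by
  simp [flatB]

theorem flat_no4 (l : List Int) (h : No4 l) : remove_fours_alt l = l := by
  induction l using List.reverseRecOn with
  | nil => rfl
  | append_singleton l x ih =>
    have hno4l : No4 l := fun u a v huv => h u a (v ++ [x]) (by simp [huv])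
    have hl : remove_fours_alt l = l := ih hno4l
    unfold remove_fours_alt at hl ⊢
    rw [List.foldl_append, List.foldl_cons, List.foldl_nil]
    rcases hsv : l.foldl stepB [] with _ | ⟨⟨v, c⟩, t⟩
    · rw [hsv] at hl
      simp [flatB] at hl
      subst hl
      simp [stepB, flatB]
    · rw [hsv] at hl
      rw [flatB_cons] at hl
      by_cases hv : v = x
      · subst hv
        by_cases h4 : c + 1 = 4
        · exfalso
          have hc3 : c = 3 := by omega
          subst hc3
          refine h (flatB t) v [] ?_
          rw [← hl]
          simp [List.replicate_succ]
        · have : stepB ((v, c) :: t) v = (v, c + 1) :: t := by simp [stepB, h4]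
          rw [this, flatB_cons, List.replicate_succ', ← List.append_assoc, hl]
      · have : stepB ((v, c) :: t) x = (x, 1) :: (v, c) :: t := by simp [stepB, hv]
        rw [this, flatB_cons, flatB_cons, List.replicate_one, hl]

-- runcount lower bound and the equalities it certifies
theorem runcount_ge (fuel : Nat) (a : List Int) (i c : Nat) : c ≤ runcount fuel a i c := by
  induction fuel generalizing c with
  | zero => simp [runcount]
  | succ fuel ih =>
    rw [runcount]
    split
    · exact le_trans (Nat.le_succ c) (ih (c + 1))
    · exact le_refl c

theorem runcount_spec (fuel : Nat) (a : List Int) (i c k : Nat) (hk1 : c ≤ k)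
    (hk2 : k < runcount fuel a i c) : i + k < a.length ∧ a[i]! = a[i + k]! := by
  induction fuel generalizing c with
  | zero => simp [runcount] at hk2; omega
  | succ fuel ih =>
    rw [runcount] at hk2
    split at hk2
    · next hcond =>
      rcases Nat.eq_or_lt_of_le hk1 with rfl | hlt
      · exact hcond
      · exact ih (c + 1) hlt hk2
    · omega

theorem runcount_step (fuel : Nat) (a : List Int) (i c : Nat)
    (h : i + c < a.length ∧ a[i]! = a[i + c]!) :
    runcount (fuel + 1) a i c = runcount fuel a i (c + 1) := by
  rw [runcount, if_pos h]

theorem getElem!_four (u : List Int) (a : Int) (v : List Int) (k : Nat) (hk : k < 4) :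
    (u ++ a :: a :: a :: a :: v)[u.length + k]! = a := by
  have hlen : u.length + k < (u ++ a :: a :: a :: a :: v).length := by simp; omega
  rw [getElem!_pos (u ++ a :: a :: a :: a :: v) (u.length + k) hlen,
    List.getElem_append_right (by omega)]
  have hk' : u.length + k - u.length = k := by omega
  simp only [hk']
  interval_cases k <;> rfl

theorem runcount_ge4_of_split (arr : List Int) (i : Nat) (u : List Int) (a : Int)
    (v : List Int) (huav : arr = u ++ a :: a :: a :: a :: v) (hi : u.length = i) :
    4 ≤ runcount (arr.length + 1) arr i 1 := by
  have hlen : arr.length = u.length + 4 + v.length := by subst huav; simp; omega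
  have gk : ∀ k, k < 4 → arr[i + k]! = a := by
    intro k hk
    subst huav hi
    exact getElem!_four u a v k hk
  have g0 : arr[i]! = a := by simpa using gk 0 (by omega)
  obtain ⟨m, hm⟩ : ∃ m, arr.length + 1 = m + 3 := ⟨arr.length - 2, by omega⟩
  rw [hm]
  show 4 ≤ runcount (m + 2 + 1) arr i 1
  rw [runcount_step (m + 2) arr i 1 ⟨by omega, by rw [g0, gk 1 (by omega)]⟩]
  show 4 ≤ runcount (m + 1 + 1) arr i 2
  rw [runcount_step (m + 1) arr i 2 ⟨by omega, by rw [g0, gk 2 (by omega)]⟩]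
  rw [runcount_step m arr i 3 ⟨by omega, by rw [g0, gk 3 (by omega)]⟩]
  exact runcount_ge m arr i 4

-- the deletion step rewrites arr as (take i) ++ [a,a,a,a] ++ (drop (i+4))
theorem split4 (arr : List Int) (i : Nat) (h : i + 4 ≤ arr.length)
    (hc : 4 ≤ runcount (arr.length + 1) arr i 1) :
    arr = arr.take i ++ arr[i]! :: arr[i]! :: arr[i]! :: arr[i]! :: arr.drop (i + 4) := by
  have e1 := runcount_spec (arr.length + 1) arr i 1 1 (le_refl 1) (by omega)
  have e2 := runcount_spec (arr.length + 1) arr i 1 2 (by omega) (by omega)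
  have e3 := runcount_spec (arr.length + 1) arr i 1 3 (by omega) (by omega)
  have d : ∀ j, j < arr.length → arr.drop j = arr[j]! :: arr.drop (j + 1) := by
    intro j hj
    rw [List.drop_eq_getElem_cons hj, getElem!_pos arr j hj]
  conv_lhs => rw [← List.take_append_drop i arr]
  congr 1
  rw [d i (by omega), d (i + 1) (by omega), d (i + 1 + 1) (by omega),
    d (i + 1 + 1 + 1) (by omega)]
  simp only [show i + 1 + 1 = i + 2 from rfl, show i + 1 + 1 + 1 = i + 3 from rfl,
    show i + 1 + 1 + 1 + 1 = i + 4 from rfl]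
  rw [← e1.2, ← e2.2, ← e3.2]

theorem passA_len_le (fuel : Nat) (arr : List Int) (i : Nat) (f : Bool) :
    (passA fuel arr i f).1.length ≤ arr.length := by
  induction fuel generalizing arr i f with
  | zero => exact le_refl _
  | succ fuel ih =>
    rw [passA]
    by_cases h4 : i + 4 ≤ arr.length
    · rw [if_pos h4]
      by_cases hc : 4 ≤ runcount (arr.length + 1) arr i 1
      · rw [if_pos hc]
        refine le_trans (ih _ _ _) ?_
        simp only [List.length_append, List.length_take, List.length_drop]
        omega
      · rw [if_neg hc]; exact ih _ _ _
    · rw [if_neg h4]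

theorem passA_true_len (fuel : Nat) (arr : List Int) (i : Nat)
    (h : (passA fuel arr i false).2 = true) :
    (passA fuel arr i false).1.length + 4 ≤ arr.length := by
  induction fuel generalizing arr i with
  | zero => simp [passA] at h
  | succ fuel ih =>
    rw [passA] at h ⊢
    by_cases h4 : i + 4 ≤ arr.length
    · rw [if_pos h4] at h ⊢
      by_cases hc : 4 ≤ runcount (arr.length + 1) arr i 1
      · rw [if_pos hc] at h ⊢
        have := passA_len_le fuel (arr.take i ++ arr.drop (i + 4)) i true
        simp only [List.length_append, List.length_take, List.length_drop] at this ⊢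
        omega
      · rw [if_neg hc] at h ⊢; exact ih arr (i + 1) h
    · rw [if_neg h4] at h; simp at h

theorem passA_flag_true (fuel : Nat) (arr : List Int) (i : Nat) :
    (passA fuel arr i true).2 = true := by
  induction fuel generalizing arr i with
  | zero => rfl
  | succ fuel ih =>
    rw [passA]
    by_cases h4 : i + 4 ≤ arr.length
    · rw [if_pos h4]
      by_cases hc : 4 ≤ runcount (arr.length + 1) arr i 1
      · rw [if_pos hc]; exact ih _ _
      · rw [if_neg hc]; exact ih _ _
    · rw [if_neg h4]

theorem passA_stack (fuel : Nat) (arr : List Int) (i : Nat) (f : Bool)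
    (hf : arr.length - i < fuel) :
    ((passA fuel arr i f).1).foldl stepB [] = arr.foldl stepB [] := by
  induction fuel generalizing arr i f with
  | zero => omega
  | succ fuel ih =>
    rw [passA]
    by_cases h4 : i + 4 ≤ arr.length
    · rw [if_pos h4]
      by_cases hc : 4 ≤ runcount (arr.length + 1) arr i 1
      · rw [if_pos hc]
        rw [ih _ i true (by
          simp only [List.length_append, List.length_take, List.length_drop]; omega)]
        conv_rhs => rw [split4 arr i h4 hc]
        exact (stack_delete _ _ _).symm
      · rw [if_neg hc]; exact ih arr (i + 1) f (by omega)
    · rw [if_neg h4]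

theorem passA_false (fuel : Nat) (arr : List Int) (i : Nat)
    (hf : arr.length - i < fuel) (h : (passA fuel arr i false).2 = false) :
    (passA fuel arr i false).1 = arr ∧
      ∀ (u : List Int) (a : Int) (v : List Int),
        arr = u ++ a :: a :: a :: a :: v → u.length < i := by
  induction fuel generalizing arr i with
  | zero => omega
  | succ fuel ih =>
    rw [passA] at h ⊢
    by_cases h4 : i + 4 ≤ arr.length
    · rw [if_pos h4] at h ⊢
      by_cases hc : 4 ≤ runcount (arr.length + 1) arr i 1
      · rw [if_pos hc] at h
        rw [passA_flag_true fuel _ i] at h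
        exact absurd h (by simp)
      · rw [if_neg hc] at h ⊢
        obtain ⟨h1, h2⟩ := ih arr (i + 1) (by omega) h
        refine ⟨h1, fun u a v huav => ?_⟩
        have hui := h2 u a v huav
        rcases Nat.lt_succ_iff_lt_or_eq.mp hui with h3 | h3
        · exact h3
        · exact absurd (runcount_ge4_of_split arr i u a v huav h3) hc
    · rw [if_neg h4] at h ⊢
      refine ⟨rfl, fun u a v huav => ?_⟩
      have : arr.length = u.length + 4 + v.length := by subst huav; simp; omega
      omega

theorem removeLoop_eq (fuel : Nat) (arr : List Int) (hf : arr.length < fuel) :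
    removeLoop fuel arr = remove_fours_alt arr := by
  induction fuel generalizing arr with
  | zero => omega
  | succ fuel ih =>
    rw [removeLoop]
    show (if (passA (arr.length + 1) arr 0 false).2 then
        removeLoop fuel (passA (arr.length + 1) arr 0 false).1
      else (passA (arr.length + 1) arr 0 false).1) = remove_fours_alt arr
    by_cases hb : (passA (arr.length + 1) arr 0 false).2
    · rw [if_pos hb]
      have hlen := passA_true_len (arr.length + 1) arr 0 hb
      rw [ih _ (by omega)]
      unfold remove_fours_alt
      rw [passA_stack (arr.length + 1) arr 0 false (by omega)]
    · rw [if_neg hb]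
      have hfalse : (passA (arr.length + 1) arr 0 false).2 = false := by
        simpa using hb
      obtain ⟨h1, h2⟩ := passA_false (arr.length + 1) arr 0 (by omega) hfalse
      have hno4 : No4 arr := fun u a v huav => absurd (h2 u a v huav) (by omega)
      rw [h1, flat_no4 arr hno4]

theorem main_eq (arr : List Int) : remove_fours arr = remove_fours_alt arr :=
  removeLoop_eq (arr.length + 1) arr (Nat.lt_succ_self _)

-- ===== VERDICT (by name: the statement is the Claim_ definition above) =====
theorem remove_fours_spec : Claim_equal_remove_fours := by
  intro arr _
  unfold Spec_remove_fours
  exact main_eq arr
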